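-- pv_equiv track=rewrite | github.com/kmg0157/Algorithm | 프로그래머스/0/181890. 왼쪽 오른쪽/왼쪽 오른쪽.py | solution
-- ===== SOURCE A (Python) =====
-- def solution(str_list):
--     answer = []
--
--     for char in str_list:
--         if char=='l':
--             answer=str_list[:str_list.index('l')]
--             break
--         elif char=='r':
--             answer=str_list[str_list.index('r')+1:]
--             break
--
--     return answer
-- ===== SOURCE B (Python) =====
-- def solution(str_list):
--     # Single forward pass with an accumulator: build the prefix element by
--     # element; at the first 'l' return the accumulated prefix, at the first
--     # 'r' exhaust the iterator for the tail. No list.index, no slicing.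
--     it = iter(str_list)
--     prefix = []
--     for h in it:
--         if h == 'l':
--             return prefix
--         if h == 'r':
--             return list(it)
--         prefix.append(h)
--     return []
-- ===== Notes on version B (the rewrite author's own statement) =====
-- stated objective: idiomatic
-- what changed: A scans with a for/break and then re-runs list.index and slices the original list; B is a single-pass accumulator: it builds the prefix element by element, returning it at the first 'l', and at the first 'r' returns the remaining elements by exhausting the iterator -- no index computation and no slicing anywhere.
import Mathlib
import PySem

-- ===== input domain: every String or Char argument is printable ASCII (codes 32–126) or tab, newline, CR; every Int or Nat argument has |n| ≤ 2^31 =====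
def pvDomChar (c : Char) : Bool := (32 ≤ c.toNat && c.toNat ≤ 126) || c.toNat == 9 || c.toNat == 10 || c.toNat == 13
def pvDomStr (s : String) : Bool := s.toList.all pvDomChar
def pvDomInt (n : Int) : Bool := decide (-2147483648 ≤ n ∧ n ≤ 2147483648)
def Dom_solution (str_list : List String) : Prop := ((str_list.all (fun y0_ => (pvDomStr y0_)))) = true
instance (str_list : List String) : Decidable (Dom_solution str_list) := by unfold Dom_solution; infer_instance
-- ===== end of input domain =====

-- B replaces A's for/break-then-index-and-slice by a tagged structural recursion that never
-- computes an index or slice (prefix built by cons on unwind); alternative decomposition, same cost.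

-- ===== PORT A =====
-- A's for-loop with break: scan the remaining list, on a hit slice the ORIGINAL list at list.index of the hit letter.
def solutionLoopA (orig : List String) : List String → List String
  | [] => []
  | c :: rest =>
    if c = "l" then
      match PySem.List.index? orig "l" with
      | some i => PySem.List.slice orig none (some (i : Int))
      | none => []      -- unreachable: 'l' was just seen
    else if c = "r" then
      match PySem.List.index? orig "r" with
      | some i => PySem.List.slice orig (some ((i : Int) + 1)) none
      | none => []      -- unreachable
    else solutionLoopA orig rest

def solution (str_list : List String) : List String :=
  solutionLoopA str_list str_list

-- ===== PORT B =====
-- Source B's single pass: acc is the accumulated prefix, the remaining list is the iterator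
def solutionGoB (acc : List String) : List String → List String
  | [] => []
  | h :: t =>
    if h = "l" then acc
    else if h = "r" then t
    else solutionGoB (acc ++ [h]) t

def solution_alt (str_list : List String) : List String :=
  solutionGoB [] str_list

-- ===== PRECONDITION & SPEC =====
def Spec_solution (str_list : List String) (out : List String) : Prop := out = solution_alt str_list
instance (str_list : List String) (out : List String) : Decidable (Spec_solution str_list out) := by unfold Spec_solution; infer_instance

-- ===== CLAIM (what is proved, stated in full; the proofs are below) =====
def Claim_equal_solution : Prop := ∀ (str_list : List String), Dom_solution str_list → Spec_solution str_list (solution str_list)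

-- ===== LEMMAS AND PROOFS =====

-- first index of v in pre ++ v :: suf when v ∉ pre
theorem index?_append_cons_self (pre suf : List String) (v : String) (h : v ∉ pre) :
    PySem.List.index? (pre ++ v :: suf) v = some pre.length := by
  rw [PySem.List.index?_eq_some_iff]
  exact ⟨pre, suf, rfl, rfl, h⟩

theorem key (pre xs : List String) (hl : "l" ∉ pre) (hr : "r" ∉ pre) :
    solutionLoopA (pre ++ xs) xs = solutionGoB pre xs := by
  induction xs generalizing pre with
  | nil => simp [solutionLoopA, solutionGoB]
  | cons c rest ih =>
    by_cases hcl : c = "l"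
    · subst hcl
      have hidx := index?_append_cons_self pre rest "l" hl
      simp only [solutionLoopA, hidx, solutionGoB, if_pos rfl]
      rw [PySem.List.slice_to _ (by positivity)]
      have h1 : ((pre.length : Int)).toNat = pre.length := by omega
      rw [h1]
      simp [List.take_left]
    · by_cases hcr : c = "r"
      · subst hcr
        have hidx := index?_append_cons_self pre rest "r" hr
        simp only [solutionLoopA, if_neg (by decide : ¬ ("r" : String) = "l"),
          hidx, solutionGoB]
        rw [PySem.List.slice_from _ (by positivity)]
        have h1 : ((pre.length : Int) + 1).toNat = pre.length + 1 := by omega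
        rw [h1]
        have h2 : List.drop (pre.length + 1) (pre ++ "r" :: rest) = rest := by
          rw [List.drop_append]; simp
        simp [h2]
      · have hstep : solutionLoopA (pre ++ c :: rest) (c :: rest)
            = solutionLoopA ((pre ++ [c]) ++ rest) rest := by
          simp [solutionLoopA, hcl, hcr]
        have hl' : "l" ∉ pre ++ [c] := by
          simp [hl]; intro h; exact hcl h.symm
        have hr' : "r" ∉ pre ++ [c] := by
          simp [hr]; intro h; exact hcr h.symm
        rw [hstep, ih (pre ++ [c]) hl' hr']
        simp [solutionGoB, hcl, hcr]

-- ===== VERDICT (by name: the statement is the Claim_ definition above) =====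
theorem solution_spec : Claim_equal_solution := by
  intro xs _
  show solution xs = solution_alt xs
  have := key [] xs (by simp) (by simp)
  simpa [solution, solution_alt] using this
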